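-- pv_equiv track=rewrite | github.com/trundleyrg/ragflow | test/calculate_patent_dialog_time.py | reconstruct_messages
-- ===== SOURCE A (Python) =====
-- def reconstruct_messages(messages: list):
--     msg = []
--     for m in messages:
--         if m["role"] == "system":
--             continue
--         if m["role"] == "assistant" and not msg:
--             continue
--         msg.append(m)
--     if not msg[-1].get("id"):
--         msg[-1]["id"] = "0000"
--     return msg, msg[-1]["id"]
-- ===== SOURCE B (Python) =====
-- def reconstruct_messages(messages: list):
--     filtered = [m for m in messages if m["role"] != "system"]
--     i = 0
--     while i < len(filtered) and filtered[i]["role"] == "assistant":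
--         i += 1
--     msg = filtered[i:]
--     if not msg[-1].get("id"):
--         msg[-1]["id"] = "0000"
--     return msg, msg[-1]["id"]
-- ===== Notes on version B (the rewrite author's own statement) =====
-- stated objective: alternative
-- what changed: Replaces A's single fused loop with empty-accumulator state by two explicit phases: a filter pass removing system messages, then an index scan dropping the leading assistant prefix.
import Mathlib
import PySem

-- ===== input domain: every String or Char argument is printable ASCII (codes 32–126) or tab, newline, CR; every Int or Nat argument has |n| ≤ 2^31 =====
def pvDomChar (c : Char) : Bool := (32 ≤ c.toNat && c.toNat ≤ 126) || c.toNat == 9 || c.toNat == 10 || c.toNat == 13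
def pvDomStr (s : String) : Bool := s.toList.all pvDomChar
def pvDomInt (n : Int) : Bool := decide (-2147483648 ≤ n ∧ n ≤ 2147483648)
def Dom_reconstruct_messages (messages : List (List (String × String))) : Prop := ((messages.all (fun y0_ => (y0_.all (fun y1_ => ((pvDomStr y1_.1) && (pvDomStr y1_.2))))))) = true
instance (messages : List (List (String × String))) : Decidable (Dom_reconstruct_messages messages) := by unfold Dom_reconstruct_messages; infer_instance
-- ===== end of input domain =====

-- B replaces A's fused guarded loop by a filter pass plus a leading-assistant index scan;
-- return-value equivalence only: both Pythons mutate the final kept message dict in place identically.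

-- m["role"] (under Pre_ the key is present, so the "" default is never the result)
def pvRole (m : List (String × String)) : String := ((PySem.Dict.mk m).get? "role").getD ""

-- the common final two Python statements of A and B: default the id of msg[-1], return (msg, msg[-1]["id"]).
-- On msg = [] Python raises IndexError (msg[-1]); that input is excluded by Pre_.
def pvFinish (msg : List (List (String × String))) : (List (List (String × String))) × String :=
  match PySem.List.pyGet? msg (-1) with
  | none => ([], "")
  | some last =>
      let d := PySem.Dict.mk last
      let d' := if (d.get? "id").getD "" = "" then d.insert "id" "0000" else d
      (msg.dropLast ++ [d'.items], (d'.get? "id").getD "")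

-- ===== PORT A =====
def reconstruct_messages (messages : List (List (String × String))) : (List (List (String × String))) × String :=
  let msg := messages.foldl (fun msg m =>
    if pvRole m = "system" then msg
    else if pvRole m = "assistant" ∧ msg = [] then msg
    else msg ++ [m]) []
  pvFinish msg

-- ===== PORT B =====
-- the while loop: advance i while filtered[i]["role"] == "assistant"
def pvSkip (filtered : List (List (String × String))) (i : Nat) : Nat :=
  if h : i < filtered.length then
    if pvRole filtered[i] = "assistant" then pvSkip filtered (i + 1) else i
  else i
termination_by filtered.length - i

def reconstruct_messages_alt (messages : List (List (String × String))) : (List (List (String × String))) × String :=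
  let filtered := messages.filter (fun m => pvRole m != "system")
  let msg := filtered.drop (pvSkip filtered 0)   -- filtered[i:] with 0 ≤ i is List.drop i
  pvFinish msg

-- ===== PRECONDITION & SPEC =====
-- Pre_ = exactly where Python A returns: every message has a "role" key (else KeyError),
-- and some message is neither system nor assistant (else msg is empty and msg[-1] raises IndexError).
def Pre_reconstruct_messages (messages : List (List (String × String))) : Prop :=
  (∀ m ∈ messages, ((PySem.Dict.mk m).get? "role").isSome) ∧
  (∃ m ∈ messages, (PySem.Dict.mk m).get? "role" ≠ some "system" ∧ (PySem.Dict.mk m).get? "role" ≠ some "assistant")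
instance (messages : List (List (String × String))) : Decidable (Pre_reconstruct_messages messages) := by unfold Pre_reconstruct_messages; infer_instance

def pvWitness_reconstruct_messages : (List (List (String × String))) := [[("role", "user"), ("id", "1")]]

def Spec_reconstruct_messages (messages : List (List (String × String))) (out : (List (List (String × String))) × String) : Prop := out = reconstruct_messages_alt messages
instance (messages : List (List (String × String))) (out : (List (List (String × String))) × String) : Decidable (Spec_reconstruct_messages messages out) := by unfold Spec_reconstruct_messages; infer_instance

-- ===== CLAIM (what is proved, stated in full; the proofs are below) =====
def Claim_equal_reconstruct_messages : Prop := ∀ (messages : List (List (String × String))), Dom_reconstruct_messages messages → Pre_reconstruct_messages messages → Spec_reconstruct_messages messages (reconstruct_messages messages)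

-- ===== LEMMAS AND PROOFS =====

-- B's index scan drops exactly the leading run of assistant messages
theorem pvSkip_drop (filtered : List (List (String × String))) :
    ∀ i, filtered.drop (pvSkip filtered i)
      = (filtered.drop i).dropWhile (fun m => pvRole m == "assistant") := by
  intro i
  induction hn : filtered.length - i using Nat.strong_induction_on generalizing i with
  | _ n ih =>
    rw [pvSkip]
    by_cases h : i < filtered.length
    · by_cases ha : pvRole filtered[i] = "assistant"
      · rw [dif_pos h, if_pos ha, List.drop_eq_getElem_cons h, List.dropWhile_cons,
          if_pos (by simp [ha])]
        exact ih (filtered.length - (i + 1)) (by omega) (i + 1) rfl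
      · rw [dif_pos h, if_neg ha, List.drop_eq_getElem_cons h, List.dropWhile_cons,
          if_neg (by simp [ha])]
    · rw [dif_neg h, List.drop_eq_nil_of_le (le_of_not_gt h), List.dropWhile_nil]

-- A's loop from a nonempty accumulator just appends the non-system messages
theorem foldA_ne_nil (l : List (List (String × String))) :
    ∀ acc : List (List (String × String)), acc ≠ [] →
      l.foldl (fun msg m =>
        if pvRole m = "system" then msg
        else if pvRole m = "assistant" ∧ msg = [] then msg
        else msg ++ [m]) acc
      = acc ++ l.filter (fun m => pvRole m != "system") := by
  induction l with
  | nil => intro acc _; simp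
  | cons m t ih =>
    intro acc hacc
    by_cases hs : pvRole m = "system"
    · simp only [List.foldl_cons, if_pos hs, List.filter_cons, ih acc hacc]
      simp [hs]
    · have hb : ¬ (pvRole m = "assistant" ∧ acc = []) := fun ⟨_, h⟩ => hacc h
      simp only [List.foldl_cons, if_neg hs, if_neg hb, List.filter_cons]
      rw [ih (acc ++ [m]) (by simp)]
      simp [hs]

-- A's loop from the empty accumulator = drop-leading-assistants of the non-system messages
theorem foldA_nil (l : List (List (String × String))) :
    l.foldl (fun msg m =>
        if pvRole m = "system" then msg
        else if pvRole m = "assistant" ∧ msg = [] then msg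
        else msg ++ [m]) []
      = (l.filter (fun m => pvRole m != "system")).dropWhile (fun m => pvRole m == "assistant") := by
  induction l with
  | nil => rfl
  | cons m t ih =>
    by_cases hs : pvRole m = "system"
    · simpa [List.filter_cons, hs] using ih
    · by_cases ha : pvRole m = "assistant"
      · simpa [List.filter_cons, hs, ha, List.dropWhile_cons] using ih
      · simp only [List.foldl_cons, if_neg hs]
        rw [if_neg (by simp [ha]), List.nil_append,
          foldA_ne_nil t [m] (by simp)]
        simp [hs, ha]

-- ===== VERDICT (by name: the statement is the Claim_ definition above) =====
theorem reconstruct_messages_spec : Claim_equal_reconstruct_messages := by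
  intro messages _ _
  show reconstruct_messages messages = reconstruct_messages_alt messages
  simp only [reconstruct_messages, reconstruct_messages_alt, foldA_nil, pvSkip_drop, List.drop_zero]
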